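-- pv_equiv track=rewrite | github.com/julsy-chen/Python-UnitTwo | GoodPair.py | ez
-- ===== SOURCE A (Python) =====
-- def ez(lst, t):
--     if len(lst) in {0,1}:
--         return 0
--     else:
--         if lst[0] == t:
--             return 1 + ez(lst[1:], t)
--         else:
--             return ez(lst[1:], t)
-- ===== SOURCE B (Python) =====
-- def ez(lst, t):
--     count = 0
--     for x in lst[:-1]:
--         if x == t:
--             count += 1
--     return count
-- ===== Notes on version B (the rewrite author's own statement) =====
-- stated objective: simpler
-- what changed: Replaces A's front-peeling recursion (which re-slices lst[1:] at each step) with a single forward accumulator loop over lst[:-1].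
import Mathlib
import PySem

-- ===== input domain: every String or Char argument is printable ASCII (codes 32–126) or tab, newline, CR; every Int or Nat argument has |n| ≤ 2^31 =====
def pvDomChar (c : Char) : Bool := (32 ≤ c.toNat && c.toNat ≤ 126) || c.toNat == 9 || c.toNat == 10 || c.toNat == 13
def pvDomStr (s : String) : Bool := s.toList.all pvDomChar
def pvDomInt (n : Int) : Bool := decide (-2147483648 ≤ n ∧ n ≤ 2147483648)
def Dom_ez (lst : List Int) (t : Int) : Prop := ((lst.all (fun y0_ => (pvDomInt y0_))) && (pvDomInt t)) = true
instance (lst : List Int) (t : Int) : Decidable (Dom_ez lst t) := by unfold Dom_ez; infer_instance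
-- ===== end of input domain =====

-- ===== PORT A =====
def ez (lst : List Int) (t : Int) : Int :=
  match lst with
  | [] => 0                 -- len(lst) in {0,1} -> 0
  | [_] => 0
  | x :: rest =>            -- lst[0] == t check, recurse on lst[1:]
      if x = t then 1 + ez rest t else ez rest t

-- ===== PORT B =====
-- B: count = 0; for x in lst[:-1]: if x == t: count += 1
def ez_alt (lst : List Int) (t : Int) : Int :=
  (PySem.List.slice lst none (some (-1))).foldl (fun c x => if x = t then c + 1 else c) 0

-- ===== PRECONDITION & SPEC =====
def Spec_ez (lst : List Int) (t : Int) (out : Int) : Prop := out = ez_alt lst t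
instance (lst : List Int) (t : Int) (out : Int) : Decidable (Spec_ez lst t out) := by unfold Spec_ez; infer_instance

-- ===== CLAIM (what is proved, stated in full; the proofs are below) =====
def Claim_equal_ez : Prop := ∀ (lst : List Int) (t : Int), Dom_ez lst t → Spec_ez lst t (ez lst t)

-- ===== LEMMAS AND PROOFS =====

-- ===== VERDICT (by name: the statement is the Claim_ definition above) =====
lemma foldl_count_acc (t : Int) (xs : List Int) (c : Int) :
    xs.foldl (fun c x => if x = t then c + 1 else c) c
      = c + xs.foldl (fun c x => if x = t then c + 1 else c) 0 := by
  induction xs generalizing c with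
  | nil => simp
  | cons a xs ih =>
      simp only [List.foldl]
      rw [ih, ih (if a = t then 0 + 1 else 0)]
      split <;> ring

lemma ez_eq_fold_dropLast (t : Int) (lst : List Int) :
    ez lst t = lst.dropLast.foldl (fun c x => if x = t then c + 1 else c) 0 := by
  induction lst with
  | nil => simp [ez]
  | cons a rest ih =>
      cases rest with
      | nil => simp [ez]
      | cons b rs =>
          rw [show (a :: b :: rs).dropLast = a :: (b :: rs).dropLast from rfl]
          simp only [ez, List.foldl]
          rw [foldl_count_acc, ← ih]
          split <;> simp

theorem ez_spec : Claim_equal_ez := by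
  intro lst t _
  unfold Spec_ez ez_alt
  rw [PySem.List.slice_to_neg_one]
  exact ez_eq_fold_dropLast t lst
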